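-- pv_equiv track=rewrite | github.com/scasta31/ST0245-003 | talleres/taller08/Taller8Punto2.py | neveras
-- ===== SOURCE A (Python) =====
-- def neveras(almacen,solicitudes):
--   resultado=[]
--   i=len(solicitudes)-1
--   while i>=0:
--     resultado.append(solicitudes[i][0])
--     for j in range(0,solicitudes[i][1]):
--       if len(almacen)!=0:
--         resultado.append(almacen.pop())
--       else:
--         return resultado
--     i=i-1
--   return resultado
-- ===== SOURCE B (Python) =====
-- def neveras(almacen, solicitudes):
--     resultado = []
--     for etiqueta, cantidad in reversed(solicitudes):
--         resultado.append(etiqueta)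
--         disponibles = len(almacen)
--         k = min(cantidad, disponibles)
--         if k > 0:
--             resultado.extend(reversed(almacen[-k:]))
--             del almacen[-k:]
--         if cantidad > disponibles:
--             return resultado
--     return resultado
-- ===== Notes on version B (the rewrite author's own statement) =====
-- stated objective: alternative
-- what changed: Replaces A's index-driven while loop with guarded element-by-element pops and a mid-loop early return by a for loop over reversed(solicitudes) that precomputes k = min(cantidad, available), consumes the last k warehouse items in one bulk slice (reversed extend + del), and checks stock exhaustion once per request.
import Mathlib
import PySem

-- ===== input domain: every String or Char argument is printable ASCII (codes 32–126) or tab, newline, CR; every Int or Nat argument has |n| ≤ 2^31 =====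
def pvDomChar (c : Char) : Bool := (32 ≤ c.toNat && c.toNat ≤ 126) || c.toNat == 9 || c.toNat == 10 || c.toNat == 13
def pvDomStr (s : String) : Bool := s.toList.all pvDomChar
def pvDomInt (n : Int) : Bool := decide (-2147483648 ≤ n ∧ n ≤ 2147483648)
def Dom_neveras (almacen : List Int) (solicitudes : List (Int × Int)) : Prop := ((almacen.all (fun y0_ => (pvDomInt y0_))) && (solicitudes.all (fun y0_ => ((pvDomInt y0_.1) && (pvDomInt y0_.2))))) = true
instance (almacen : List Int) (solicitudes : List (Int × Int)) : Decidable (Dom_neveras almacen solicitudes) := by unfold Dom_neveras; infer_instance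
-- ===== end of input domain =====

-- ===== PORT A =====
-- B replaces the pop-one-at-a-time inner loop with a bulk slice consumption per request (objective: alternative; same cost).
-- Both Pythons mutate `almacen` identically (they remove the same served items); the theorems are about the return value.

-- inner 'for j in range(0, cantidad)' loop: pops almacen's last element each step,
-- flag true = the 'return resultado' branch was taken (warehouse empty)
def neverasPop : List Int → List Int → Nat → (List Int × List Int × Bool)
  | alm, res, 0 => (alm, res, false)
  | alm, res, n+1 =>
    if alm ≠ [] then neverasPop alm.dropLast (res ++ [alm.getLast!]) n
    else (alm, res, true)

-- outer 'while i >= 0' loop: walks solicitudes back to front (given here as solicitudes.reverse)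
def neverasLoop : List Int → List (Int × Int) → List Int → List Int
  | _, [], res => res
  | alm, (et, c) :: rest, res =>
    match neverasPop alm (res ++ [et]) c.toNat with
    | (_, res', true) => res'
    | (alm', res', false) => neverasLoop alm' rest res'

def neveras (almacen : List Int) (solicitudes : List (Int × Int)) : List Int :=
  neverasLoop almacen solicitudes.reverse []

-- ===== PORT B =====
-- for-loop of Source B over reversed(solicitudes); k = min(cantidad, disponibles);
-- 'reversed(almacen[-k:])' = (almacen.drop (len - k)).reverse and 'del almacen[-k:]' = almacen.take (len - k)
-- (exact for 0 < k ≤ len, the only case the k > 0 guard lets through)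
def neverasAltLoop : List Int → List (Int × Int) → List Int → List Int
  | _, [], res => res
  | alm, (et, c) :: rest, res =>
    let res := res ++ [et]
    let disponibles : Int := alm.length
    let k := min c disponibles
    let res := if k > 0 then res ++ (alm.drop (alm.length - k.toNat)).reverse else res
    let alm := if k > 0 then alm.take (alm.length - k.toNat) else alm
    if c > disponibles then res else neverasAltLoop alm rest res

def neveras_alt (almacen : List Int) (solicitudes : List (Int × Int)) : List Int :=
  neverasAltLoop almacen solicitudes.reverse []


-- ===== PRECONDITION & SPEC =====
def Spec_neveras (almacen : List Int) (solicitudes : List (Int × Int)) (out : List Int) : Prop := out = neveras_alt almacen solicitudes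
instance (almacen : List Int) (solicitudes : List (Int × Int)) (out : List Int) : Decidable (Spec_neveras almacen solicitudes out) := by unfold Spec_neveras; infer_instance

-- ===== CLAIM (what is proved, stated in full; the proofs are below) =====
def Claim_equal_neveras : Prop := ∀ (almacen : List Int) (solicitudes : List (Int × Int)), Dom_neveras almacen solicitudes → Spec_neveras almacen solicitudes (neveras almacen solicitudes)

-- ===== LEMMAS AND PROOFS =====

-- ===== VERDICT (by name: the statement is the Claim_ definition above) =====
-- neverasPop characterised: drains min(n, |alm|) items off the back, flag says n exceeded the stock
theorem neverasPop_spec (n : Nat) : ∀ (alm res : List Int),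
    neverasPop alm res n =
      if n ≤ alm.length then
        (alm.take (alm.length - n), res ++ (alm.drop (alm.length - n)).reverse, false)
      else ([], res ++ alm.reverse, true) := by
  induction n with
  | zero => intro alm res; simp [neverasPop]
  | succ n ih =>
    intro alm res
    rcases alm.eq_nil_or_concat with h | ⟨ys, y, h⟩
    · subst h; simp [neverasPop]
    · rw [List.concat_eq_append] at h
      subst h
      have hne : ys ++ [y] ≠ [] := by simp
      rw [neverasPop, if_pos hne, List.dropLast_concat, ih]
      rw [show (ys ++ [y]).getLast! = y by cases ys with
        | nil => rfl
        | cons a t => simp [List.getLast!]]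
      have hlen : (ys ++ [y]).length = ys.length + 1 := by simp
      by_cases hc : n ≤ ys.length
      · rw [if_pos hc, if_pos (by omega : n + 1 ≤ (ys ++ [y]).length)]
        have h1 : (ys ++ [y]).length - (n + 1) = ys.length - n := by omega
        have h2 : ys.length - n ≤ ys.length := by omega
        rw [h1, List.take_append_of_le_length h2, List.drop_append_of_le_length h2]
        simp
      · rw [if_neg hc, if_neg (by omega : ¬ (n + 1 ≤ (ys ++ [y]).length))]
        simp

theorem loops_eq : ∀ (sol : List (Int × Int)) (alm res : List Int),
    neverasLoop alm sol res = neverasAltLoop alm sol res := by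
  intro sol
  induction sol with
  | nil => intro alm res; rfl
  | cons p rest ih =>
    obtain ⟨et, c⟩ := p
    intro alm res
    rw [neverasLoop, neverasAltLoop, neverasPop_spec]
    by_cases hc : c ≤ 0
    · -- no items requested: k ≤ 0, pop loop does nothing
      have h0 : c.toNat = 0 := Int.toNat_of_nonpos hc
      have hk : ¬ (min c (alm.length : Int) > 0) := by
        simp only [gt_iff_lt, lt_min_iff, not_and]; intro h; omega
      rw [h0, if_pos (by omega : 0 ≤ alm.length)]
      simp only [Nat.sub_zero, List.take_length, List.drop_length, List.reverse_nil,
        List.append_nil, hk, if_neg (by omega : ¬ (c > (alm.length : Int)))]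
      exact ih alm (res ++ [et])
    · push Not at hc
      by_cases hle : c ≤ (alm.length : Int)
      · -- enough stock: serve c items, continue
        have hn : c.toNat ≤ alm.length := by omega
        have hk : min c (alm.length : Int) = c := min_eq_left hle
        rw [if_pos hn]
        simp only [hk, if_pos (by omega : c > 0), if_neg (by omega : ¬ (c > (alm.length : Int)))]
        exact ih _ _
      · -- stock exhausted: both return immediately
        push Not at hle
        have hn : ¬ (c.toNat ≤ alm.length) := by omega
        have hk : min c (alm.length : Int) = (alm.length : Int) := min_eq_right (le_of_lt hle)
        rw [if_neg hn]
        simp only [hk, if_pos (by omega : c > (alm.length : Int))]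
        by_cases hz : (alm.length : Int) > 0
        · rw [if_pos hz]
          simp [List.append_assoc]
        · have h0 : alm.length = 0 := by omega
          rw [List.length_eq_zero_iff.mp h0]
          simp

-- ===== VERDICT (by name: the statement is the Claim_ definition above) =====
theorem neveras_spec : Claim_equal_neveras := by
  intro almacen solicitudes _
  unfold Spec_neveras neveras neveras_alt
  exact loops_eq _ _ _
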